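-- pv_equiv track=rewrite | github.com/v2rockets/Loyal-Elephie | backend/llm_utils.py | simplify_markdown_headers
-- ===== SOURCE A (Python) =====
-- def simplify_markdown_headers(page_content, current_nesting_level):
--     # Split the content into lines for processing
--     lines = page_content.split('\n')
--
--     # Process each line to adjust header levels
--     simplified_lines = []
--     for line in lines:
--         # Check if the line starts with markdown header syntax
--         if line.startswith('#'):
--             # Count the number of '#' to determine the original level
--             header_level = line.count('#')
--
--             # Calculate the new header level
--             new_header_level = header_level - current_nesting_level + 1
--
--             # Ensure the new header level is at least 1
--             new_header_level = max(new_header_level, 1)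
--
--             # Replace the original header syntax with the new level
--             new_header = '#' * new_header_level + ' ' + line.lstrip('#').lstrip()
--             simplified_lines.append(new_header)
--         else:
--             # If it's not a header, keep the line as is
--             simplified_lines.append(line)
--
--     # Join the lines back into a single string
--     simplified_content = '\n'.join(simplified_lines)
--     return simplified_content
-- ===== SOURCE B (Python) =====
-- def _fix(line, current_nesting_level):
--     # Adjust one line; non-headers pass through untouched.
--     if not line.startswith('#'):
--         return line
--     new_level = max(line.count('#') - current_nesting_level + 1, 1)
--     return '#' * new_level + ' ' + line.lstrip('#').lstrip()
--
--
-- def simplify_markdown_headers(page_content, current_nesting_level):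
--     # Single forward scan: peel one line at a time with partition and emit
--     # the (possibly rewritten) line plus its separator directly; no
--     # split-into-list / map / join round trip.
--     pieces = []
--     rest = page_content
--     while True:
--         line, sep, rest = rest.partition('\n')
--         pieces.append(_fix(line, current_nesting_level))
--         if not sep:
--             return ''.join(pieces)
--         pieces.append('\n')
-- ===== Notes on version B (the rewrite author's own statement) =====
-- stated objective: alternative
-- what changed: Replaces A's split(' ') into a list, per-line transform loop, and ' '.join round trip with a single forward scan that peels one line at a time via str.partition and emits the (possibly rewritten) line and its separator directly.
import Mathlib
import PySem

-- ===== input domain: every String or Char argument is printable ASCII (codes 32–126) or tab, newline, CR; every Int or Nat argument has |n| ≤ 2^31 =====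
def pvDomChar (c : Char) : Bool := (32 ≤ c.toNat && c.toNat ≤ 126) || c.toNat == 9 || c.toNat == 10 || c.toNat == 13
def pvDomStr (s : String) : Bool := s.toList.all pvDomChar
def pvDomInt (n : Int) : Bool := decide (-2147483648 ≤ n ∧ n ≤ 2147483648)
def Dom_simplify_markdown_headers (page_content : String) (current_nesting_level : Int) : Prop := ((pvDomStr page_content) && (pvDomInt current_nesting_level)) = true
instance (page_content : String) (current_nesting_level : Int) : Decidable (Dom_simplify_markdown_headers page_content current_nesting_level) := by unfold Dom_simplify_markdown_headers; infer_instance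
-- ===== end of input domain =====

-- B replaces A's split-into-list / per-line loop / join round trip by a single
-- forward scan that peels one line at a time (str.partition) and emits output
-- directly (objective: alternative decomposition, same cost).

-- ===== PORT A =====
-- literal port of A: split on '\n', loop appending transformed lines, join with '\n'
-- (line.lstrip('#') with the single-char set {'#'} is exactly dropWhile (· == '#'))
def simplify_markdown_headers (page_content : String) (current_nesting_level : Int) : String :=
  let lines := PySem.Chars.splitOn page_content.toList ['\n']
  let simplified_lines := lines.foldl (fun acc line =>
    if PySem.Chars.startswith line ['#'] then
      let header_level : Int := (PySem.Chars.count line ['#'] : Int)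
      let new_header_level := header_level - current_nesting_level + 1
      let new_header_level2 := max new_header_level 1
      let new_header := List.replicate new_header_level2.toNat '#' ++ ' ' ::
        PySem.Chars.lstrip (line.dropWhile (· == '#'))
      acc ++ [new_header]
    else
      acc ++ [line]) []
  String.mk (PySem.Chars.join ['\n'] simplified_lines)

-- ===== PORT B =====
-- port of Source B's _fix (early-return guard style; lstrip('#') = dropWhile (· == '#'))
def pvFix (line : List Char) (current_nesting_level : Int) : List Char :=
  if !(PySem.Chars.startswith line ['#']) then line
  else
    let new_level := max ((PySem.Chars.count line ['#'] : Int) - current_nesting_level + 1) 1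
    List.replicate new_level.toNat '#' ++ ' ' :: PySem.Chars.lstrip (line.dropWhile (· == '#'))

-- port of Source B's while-loop: rest.partition('\n') = (takeWhile, sep, drop); the
-- pieces list joined by ''.join at the end is emitted here as direct concatenation
def pvAltGo (current_nesting_level : Int) (rest : List Char) : List Char :=
  let line := rest.takeWhile (fun c => !(c == '\n'))
  if _h : line.length < rest.length then
    pvFix line current_nesting_level ++ '\n' :: pvAltGo current_nesting_level (rest.drop (line.length + 1))
  else
    pvFix line current_nesting_level
termination_by rest.length
decreasing_by simp only [List.length_drop]; omega

def simplify_markdown_headers_alt (page_content : String) (current_nesting_level : Int) : String :=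
  String.mk (pvAltGo current_nesting_level page_content.toList)

-- ===== PRECONDITION & SPEC =====
def Spec_simplify_markdown_headers (page_content : String) (current_nesting_level : Int) (out : String) : Prop := out = simplify_markdown_headers_alt page_content current_nesting_level
instance (page_content : String) (current_nesting_level : Int) (out : String) : Decidable (Spec_simplify_markdown_headers page_content current_nesting_level out) := by unfold Spec_simplify_markdown_headers; infer_instance

-- ===== CLAIM (what is proved, stated in full; the proofs are below) =====
def Claim_equal_simplify_markdown_headers : Prop := ∀ (page_content : String) (current_nesting_level : Int), Dom_simplify_markdown_headers page_content current_nesting_level → Spec_simplify_markdown_headers page_content current_nesting_level (simplify_markdown_headers page_content current_nesting_level)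

-- ===== LEMMAS AND PROOFS =====

-- proof-side model of Python's split('\n'), char-structural
def pvSplit : List Char → List (List Char)
  | [] => [[]]
  | c :: rest => if c == '\n' then [] :: pvSplit rest else (pvSplit rest).modifyHead (c :: ·)

theorem pvSplit_ne_nil (cs : List Char) : pvSplit cs ≠ [] := by
  induction cs with
  | nil => simp [pvSplit]
  | cons c rest ih =>
    simp only [pvSplit]
    split
    · simp
    · cases h : pvSplit rest with
      | nil => exact absurd h ih
      | cons a t => simp [List.modifyHead]

theorem pvGo_eq (fuel : Nat) (l cur : List Char) (acc : List (List Char)) (h : l.length < fuel) :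
    PySem.Chars.splitOn.go ['\n'] fuel l cur acc
      = acc.reverse ++ (pvSplit l).modifyHead (cur.reverse ++ ·) := by
  induction fuel generalizing l cur acc with
  | zero => omega
  | succ n ih =>
    cases l with
    | nil => simp [PySem.Chars.splitOn.go, pvSplit]
    | cons c rest =>
      by_cases hc : c = '\n'
      · subst hc
        rw [show PySem.Chars.splitOn.go ['\n'] (n+1) ('\n' :: rest) cur acc
              = PySem.Chars.splitOn.go ['\n'] n rest [] (cur.reverse :: acc) by
            simp [PySem.Chars.splitOn.go, List.isPrefixOf]]
        rw [ih rest [] (cur.reverse :: acc) (by simpa using Nat.lt_of_succ_lt_succ h)]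
        simp only [pvSplit, if_pos (by rfl : ('\n' == '\n') = true)]
        cases pvSplit rest <;> simp [List.modifyHead]
      · rw [show PySem.Chars.splitOn.go ['\n'] (n+1) (c :: rest) cur acc
              = PySem.Chars.splitOn.go ['\n'] n rest (c :: cur) acc by
            simp only [PySem.Chars.splitOn.go, List.isPrefixOf]
            simp
            exact fun h' => absurd h'.symm hc]
        rw [ih rest (c :: cur) acc (by simpa using Nat.lt_of_succ_lt_succ h)]
        cases hp : pvSplit rest with
        | nil => exact absurd hp (pvSplit_ne_nil rest)
        | cons a t =>
          simp [pvSplit, hc, hp, List.modifyHead]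

theorem pvSplitOn_eq (cs : List Char) : PySem.Chars.splitOn cs ['\n'] = pvSplit cs := by
  rw [PySem.Chars.splitOn, pvGo_eq cs.length.succ cs [] [] (Nat.lt_succ_self _)]
  cases h : pvSplit cs with
  | nil => exact absurd h (pvSplit_ne_nil cs)
  | cons a t => simp [List.modifyHead]

-- A's per-line branch is pvFix
theorem pvFix_branch (line : List Char) (lvl : Int) :
    (if PySem.Chars.startswith line ['#'] then
      List.replicate (max ((PySem.Chars.count line ['#'] : Int) - lvl + 1) 1).toNat '#' ++ ' ' ::
        PySem.Chars.lstrip (line.dropWhile (· == '#'))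
    else line) = pvFix line lvl := by
  by_cases h : PySem.Chars.startswith line ['#'] = true <;> simp [pvFix, h]

-- pvSplit on a newline-free list, and on a newline-free prefix followed by '\n'
theorem pvSplit_no_nl (l : List Char) (h : ∀ c ∈ l, ¬ c = '\n') : pvSplit l = [l] := by
  induction l with
  | nil => rfl
  | cons c rest ih =>
    have hc : ¬ c = '\n' := h c (by simp)
    simp [pvSplit, hc, ih (fun x hx => h x (by simp [hx])), List.modifyHead]

theorem pvSplit_append_nl (l r : List Char) (h : ∀ c ∈ l, ¬ c = '\n') :
    pvSplit (l ++ '\n' :: r) = l :: pvSplit r := by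
  induction l with
  | nil => simp [pvSplit]
  | cons c rest ih =>
    have hc : ¬ c = '\n' := h c (by simp)
    have := ih (fun x hx => h x (by simp [hx]))
    simp [pvSplit, hc, this, List.modifyHead]

theorem pvAltGo_eq (lvl : Int) (cs : List Char) :
    pvAltGo lvl cs = PySem.Chars.join ['\n'] ((pvSplit cs).map (pvFix · lvl)) := by
  induction cs using pvAltGo.induct with
  | case1 cs line h ih =>
    rw [pvAltGo, dif_pos h]
    have hline : line = cs.takeWhile (fun c => !(c == '\n')) := rfl
    have hnl : ∀ c ∈ line, ¬ c = '\n' := by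
      intro c hc
      have := List.mem_takeWhile_imp (hline ▸ hc)
      simpa using this
    have hdec : cs = line ++ '\n' :: cs.drop (line.length + 1) := by
      have hsplit : line ++ cs.dropWhile (fun c => !(c == '\n')) = cs :=
        List.takeWhile_append_dropWhile ..
      cases hd : cs.dropWhile (fun c => !(c == '\n')) with
      | nil =>
        exfalso
        have : line.length = cs.length := by
          have := congrArg List.length hsplit
          simpa [hd] using this
        omega
      | cons d ds =>
        have hdfalse : (fun c => !(c == '\n')) d = false := by
          have hne : cs.dropWhile (fun c => !(c == '\n')) ≠ [] := by simp [hd]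
          have := List.head_dropWhile_not (p := fun c => !(c == '\n')) (l := cs) hne
          simpa [hd] using this
        have hdn : d = '\n' := by simpa using hdfalse
        subst hdn
        have hcs : cs = line ++ '\n' :: ds := by rw [← hsplit, hd]
        have hds : cs.drop (line.length + 1) = ds := by
          rw [hcs, show line.length + 1 = (line ++ ['\n']).length by simp,
              show line ++ '\n' :: ds = (line ++ ['\n']) ++ ds by simp]
          exact List.drop_left
        rw [hds]; exact hcs
    conv_rhs => rw [hdec]
    rw [pvSplit_append_nl _ _ hnl]
    cases hp : pvSplit (cs.drop (line.length + 1)) with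
    | nil => exact absurd hp (pvSplit_ne_nil _)
    | cons a t =>
      rw [ih]
      simp only [hp, List.map_cons, PySem.Chars.join_cons_cons]
      simp only [← hline]
      simp
  | case2 cs line h =>
    rw [pvAltGo, dif_neg h]
    have hline : line = cs.takeWhile (fun c => !(c == '\n')) := rfl
    have h' : ¬ (cs.takeWhile (fun c => !(c == '\n'))).length < cs.length := h
    have hlen : line.length = cs.length := by
      have := (List.takeWhile_prefix (l := cs) (fun c => !(c == '\n'))).length_le
      rw [hline]
      omega
    have hcs : line = cs :=
      (List.takeWhile_prefix (fun c => !(c == '\n'))).eq_of_length hlen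
    have hnl : ∀ c ∈ cs, ¬ c = '\n' := by
      intro c hc
      have := List.mem_takeWhile_imp (hline ▸ hcs ▸ hc)
      simpa using this
    rw [pvSplit_no_nl cs hnl,
        show cs.takeWhile (fun c => !(c == '\n')) = cs from hline ▸ hcs]
    simp [PySem.Chars.join_singleton]

-- main equality, on the character level
theorem pvMain (page_content : String) (lvl : Int) :
    simplify_markdown_headers page_content lvl = simplify_markdown_headers_alt page_content lvl := by
  unfold simplify_markdown_headers simplify_markdown_headers_alt
  rw [pvSplitOn_eq, pvAltGo_eq]
  rw [show (fun (acc : List (List Char)) (line : List Char) =>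
        if PySem.Chars.startswith line ['#'] then
          acc ++ [List.replicate (max ((PySem.Chars.count line ['#'] : Int) - lvl + 1) 1).toNat '#' ++ ' ' ::
            PySem.Chars.lstrip (line.dropWhile (· == '#'))]
        else acc ++ [line])
      = (fun acc line => acc ++ [pvFix line lvl]) by
    funext acc line
    rw [← pvFix_branch line lvl]
    split <;> rfl]
  simp only [PySem.List.foldl_append_singleton_eq_map]
  simp

-- ===== VERDICT (by name: the statement is the Claim_ definition above) =====
theorem simplify_markdown_headers_spec : Claim_equal_simplify_markdown_headers := by
  intro p lvl _
  unfold Spec_simplify_markdown_headers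
  exact pvMain p lvl
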